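-- pv_equiv track=rewrite | github.com/matkob/bpspotter | src/segmentation.py | is_neighbour
-- ===== SOURCE A (Python) =====
-- def is_neighbour(region_group1, region_group2):
--     for region1 in region_group1:
--         for region2 in region_group2:
--             if (region1[2] > region2[0] and region1[0] < region2[2] and (
--                     region1[1] == region2[3] or region1[3] == region2[1])) \
--                     or (region1[3] > region2[1] and region1[1] < region2[3] and (
--                     region1[0] == region2[2] or region1[2] == region2[0])):
--                 return True
--     return False
-- ===== SOURCE B (Python) =====
-- def _index(boxes, pos):
--     # group the boxes of region_group2 by one edge coordinate
--     d = {}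
--     for b in boxes:
--         d[b[pos]] = d.get(b[pos], []) + [b]
--     return d
--
--
-- def is_neighbour(region_group1, region_group2):
--     # Hash-index group2 by each of its four edge coordinates once, then each
--     # group1 box only inspects the boxes sharing a touching edge coordinate.
--     by_bottom = _index(region_group2, 3)
--     by_top = _index(region_group2, 1)
--     by_right = _index(region_group2, 2)
--     by_left = _index(region_group2, 0)
--     for r in region_group1:
--         for b in by_bottom.get(r[1], []) + by_top.get(r[3], []):
--             if r[2] > b[0] and r[0] < b[2]:
--                 return True
--         for b in by_right.get(r[0], []) + by_left.get(r[2], []):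
--             if r[3] > b[1] and r[1] < b[3]:
--                 return True
--     return False
-- ===== Notes on version B (the rewrite author's own statement) =====
-- stated objective: alternative
-- what changed: B replaces A's all-pairs nested scan with four hash indexes of region_group2 keyed by each edge coordinate, so every group1 box only inspects the group2 boxes that share a touching edge coordinate; on inputs where A finds a pair early the index build makes B no faster overall.
-- outside the precondition, e.g. on is_neighbour([(0, 0, 2, 2)], [(2, 0, 3, 2), (9,)]): A returns True, B raises IndexError; on is_neighbour([], [(1,)]): A returns False, B raises IndexError
import Mathlib
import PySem

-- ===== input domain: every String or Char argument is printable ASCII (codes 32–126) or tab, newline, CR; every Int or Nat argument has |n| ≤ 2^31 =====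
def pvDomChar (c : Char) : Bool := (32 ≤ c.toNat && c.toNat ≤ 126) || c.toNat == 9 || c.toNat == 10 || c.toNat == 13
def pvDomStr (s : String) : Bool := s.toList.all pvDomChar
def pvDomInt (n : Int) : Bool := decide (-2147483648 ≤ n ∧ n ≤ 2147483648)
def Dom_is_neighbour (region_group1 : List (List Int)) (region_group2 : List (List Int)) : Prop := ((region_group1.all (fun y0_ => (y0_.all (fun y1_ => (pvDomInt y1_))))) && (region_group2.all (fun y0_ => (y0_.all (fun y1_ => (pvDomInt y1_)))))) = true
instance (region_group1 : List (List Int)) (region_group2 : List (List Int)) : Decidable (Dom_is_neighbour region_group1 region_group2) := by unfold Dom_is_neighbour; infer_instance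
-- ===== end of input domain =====

-- B replaces A's all-pairs nested scan with four hash indexes of region_group2 keyed by each
-- edge coordinate, so each group1 box only inspects group2 boxes sharing a touching edge coordinate.

-- ===== PORT A =====
def is_neighbour (region_group1 : List (List Int)) (region_group2 : List (List Int)) : Bool :=
  region_group1.any (fun region1 =>
    region_group2.any (fun region2 =>
      ((PySem.List.pyGetD region1 2 0 > PySem.List.pyGetD region2 0 0 &&
        PySem.List.pyGetD region1 0 0 < PySem.List.pyGetD region2 2 0 &&
        (PySem.List.pyGetD region1 1 0 == PySem.List.pyGetD region2 3 0 ||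
         PySem.List.pyGetD region1 3 0 == PySem.List.pyGetD region2 1 0)) ||
       (PySem.List.pyGetD region1 3 0 > PySem.List.pyGetD region2 1 0 &&
        PySem.List.pyGetD region1 1 0 < PySem.List.pyGetD region2 3 0 &&
        (PySem.List.pyGetD region1 0 0 == PySem.List.pyGetD region2 2 0 ||
         PySem.List.pyGetD region1 2 0 == PySem.List.pyGetD region2 0 0)))))

-- ===== PORT B =====
-- helper _index: group the boxes by one edge coordinate (d[b[pos]] = d.get(b[pos], []) + [b])
def pvIndex (boxes : List (List Int)) (pos : Int) : PySem.Dict Int (List (List Int)) :=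
  boxes.foldl (fun d b => d.modify (PySem.List.pyGetD b pos 0) [] (· ++ [b])) PySem.Dict.empty

def is_neighbour_alt (region_group1 : List (List Int)) (region_group2 : List (List Int)) : Bool :=
  let by_bottom := pvIndex region_group2 3
  let by_top := pvIndex region_group2 1
  let by_right := pvIndex region_group2 2
  let by_left := pvIndex region_group2 0
  region_group1.any (fun r =>
    ((by_bottom.getD (PySem.List.pyGetD r 1 0) [] ++ by_top.getD (PySem.List.pyGetD r 3 0) []).any
      (fun b => PySem.List.pyGetD r 2 0 > PySem.List.pyGetD b 0 0 &&
                PySem.List.pyGetD r 0 0 < PySem.List.pyGetD b 2 0))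
    ||
    ((by_right.getD (PySem.List.pyGetD r 0 0) [] ++ by_left.getD (PySem.List.pyGetD r 2 0) []).any
      (fun b => PySem.List.pyGetD r 3 0 > PySem.List.pyGetD b 1 0 &&
                PySem.List.pyGetD r 1 0 < PySem.List.pyGetD b 3 0)))

-- ===== PRECONDITION & SPEC =====
-- Pre_ excludes inputs containing a region with fewer than 4 coordinates: on those A raises
-- IndexError, or returns a value only by accident of its early exit / an empty group (B raises
-- IndexError there while building/probing the index).
def Pre_is_neighbour (region_group1 : List (List Int)) (region_group2 : List (List Int)) : Prop :=
  (∀ r ∈ region_group1, 4 ≤ r.length) ∧ (∀ r ∈ region_group2, 4 ≤ r.length)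
instance (region_group1 : List (List Int)) (region_group2 : List (List Int)) : Decidable (Pre_is_neighbour region_group1 region_group2) := by unfold Pre_is_neighbour; infer_instance

def pvWitness_is_neighbour : List (List Int) × List (List Int) := ([[0, 0, 2, 2]], [[2, 0, 3, 2]])

def Spec_is_neighbour (region_group1 : List (List Int)) (region_group2 : List (List Int)) (out : Bool) : Prop := out = is_neighbour_alt region_group1 region_group2
instance (region_group1 : List (List Int)) (region_group2 : List (List Int)) (out : Bool) : Decidable (Spec_is_neighbour region_group1 region_group2 out) := by unfold Spec_is_neighbour; infer_instance

-- ===== CLAIM (what is proved, stated in full; the proofs are below) =====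
def Claim_equal_is_neighbour : Prop := ∀ (region_group1 : List (List Int)) (region_group2 : List (List Int)), Dom_is_neighbour region_group1 region_group2 → Pre_is_neighbour region_group1 region_group2 → Spec_is_neighbour region_group1 region_group2 (is_neighbour region_group1 region_group2)

-- ===== LEMMAS AND PROOFS =====

-- the grouped lists of pvIndex: looking up k yields exactly the boxes whose pos-coordinate is k
theorem pvIndex_getD (boxes : List (List Int)) (pos : Int) (k : Int) :
    (pvIndex boxes pos).getD k [] = boxes.filter (fun b => PySem.List.pyGetD b pos 0 == k) := by
  unfold pvIndex
  rw [show (boxes.foldl (fun d b => d.modify (PySem.List.pyGetD b pos 0) [] (· ++ [b])) PySem.Dict.empty)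
        = ((boxes.map (fun b => (PySem.List.pyGetD b pos 0, b))).foldl
            (fun d p => d.modify p.1 [] (· ++ [p.2])) PySem.Dict.empty) from
      (@List.foldl_map (List Int) (Int × List Int) (PySem.Dict Int (List (List Int)))
        (fun b => (PySem.List.pyGetD b pos 0, b)) (fun d p => d.modify p.1 [] (· ++ [p.2]))
        boxes PySem.Dict.empty).symm]
  rw [PySem.Dict.getD_foldl_modify_append]
  simp [List.filter_map, Function.comp_def]

theorem mem_pvIndex (boxes : List (List Int)) (pos k : Int) (b : List Int) :
    b ∈ (pvIndex boxes pos).getD k [] ↔ b ∈ boxes ∧ PySem.List.pyGetD b pos 0 = k := by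
  simp [pvIndex_getD, List.mem_filter]

theorem is_neighbour_spec : Claim_equal_is_neighbour := by
  intro g1 g2 _ _
  unfold Spec_is_neighbour is_neighbour is_neighbour_alt
  rw [Bool.eq_iff_iff]
  simp only [List.any_eq_true, List.mem_append, mem_pvIndex,
    Bool.or_eq_true, Bool.and_eq_true, beq_iff_eq, decide_eq_true_eq]
  constructor
  · rintro ⟨r1, h1, r2, h2, hc⟩
    refine ⟨r1, h1, ?_⟩
    rcases hc with ⟨⟨hx1, hx2⟩, hk⟩ | ⟨⟨hy1, hy2⟩, hk⟩
    · exact Or.inl ⟨r2, Or.imp (fun h => ⟨h2, h.symm⟩) (fun h => ⟨h2, h.symm⟩) hk, hx1, hx2⟩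
    · exact Or.inr ⟨r2, Or.imp (fun h => ⟨h2, h.symm⟩) (fun h => ⟨h2, h.symm⟩) hk, hy1, hy2⟩
  · rintro ⟨r1, h1, ⟨r2, hm, hx1, hx2⟩ | ⟨r2, hm, hy1, hy2⟩⟩
    · rcases hm with ⟨h2, hk⟩ | ⟨h2, hk⟩
      · exact ⟨r1, h1, r2, h2, Or.inl ⟨⟨hx1, hx2⟩, Or.inl hk.symm⟩⟩
      · exact ⟨r1, h1, r2, h2, Or.inl ⟨⟨hx1, hx2⟩, Or.inr hk.symm⟩⟩
    · rcases hm with ⟨h2, hk⟩ | ⟨h2, hk⟩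
      · exact ⟨r1, h1, r2, h2, Or.inr ⟨⟨hy1, hy2⟩, Or.inl hk.symm⟩⟩
      · exact ⟨r1, h1, r2, h2, Or.inr ⟨⟨hy1, hy2⟩, Or.inr hk.symm⟩⟩
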